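-- pv_equiv track=rewrite | github.com/francozaina/IntProgPython | repaso.py | pos_secuencia_ordenada_mas_larga
-- ===== SOURCE A (Python) =====
-- def pos_secuencia_ordenada_mas_larga(s: list[int]) -> int:
--     # --- 1. Inicialización del RÉCORD (Mejor caso) ---
--     pos_mejor = 0
--     long_mejor = 1
--
--     # --- 2. Inicialización del ACTUAL (Caso presente) ---
--     pos_actual = 0
--     long_actual = 1
--
--     # Recorremos hasta el anteúltimo para comparar con el siguiente
--     for i in range(len(s) - 1):
--
--         # ¿El actual es menor o igual al siguiente? (Sigue ordenado)
--         if s[i] <= s[i+1]: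
--             long_actual = long_actual + 1
--
--         else:
--             # ¡Se rompió la racha!
--
--             # A) Chequeamos si la que terminó es un nuevo récord
--             if long_actual > long_mejor:
--                 long_mejor = long_actual
--                 pos_mejor = pos_actual
--
--             # B) Reseteamos para empezar una nueva racha desde el siguiente
--             pos_actual = i + 1
--             long_actual = 1
--     # --- 3. EL CHEQUEO FINAL ---
--     # Si la lista termina ordenada (ej: 1, 2, 3, 4, 5), el 'else' del bucle
--     # nunca se ejecuta y no guardaríamos ese récord. Hay que hacerlo acá.
--     if long_actual > long_mejor:
--         pos_mejor = pos_actual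
--         # (No hace falta actualizar long_mejor porque ya terminamos)
--
--     return pos_mejor
-- ===== SOURCE B (Python) =====
-- def pos_secuencia_ordenada_mas_larga(s: list[int]) -> int:
--     # Phase 1: segment s into maximal non-decreasing runs as (start, length) pairs.
--     runs = []
--     start = 0
--     for i in range(1, len(s)):
--         if s[i - 1] > s[i]:
--             runs.append((start, i - start))
--             start = i
--     if s:
--         runs.append((start, len(s) - start))
--     # Phase 2: pick the earliest run of greatest length (strict > keeps the first).
--     best_pos, best_len = 0, 0
--     for pos, length in runs:
--         if length > best_len:
--             best_pos, best_len = pos, length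
--     return best_pos
-- ===== Notes on version B (the rewrite author's own statement) =====
-- stated objective: alternative
-- what changed: Replaces A's single fused record-tracking scan by a two-phase algorithm: one pass segments the list into maximal non-decreasing runs (start,length), a second pass selects the earliest run of greatest length.
import Mathlib
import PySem

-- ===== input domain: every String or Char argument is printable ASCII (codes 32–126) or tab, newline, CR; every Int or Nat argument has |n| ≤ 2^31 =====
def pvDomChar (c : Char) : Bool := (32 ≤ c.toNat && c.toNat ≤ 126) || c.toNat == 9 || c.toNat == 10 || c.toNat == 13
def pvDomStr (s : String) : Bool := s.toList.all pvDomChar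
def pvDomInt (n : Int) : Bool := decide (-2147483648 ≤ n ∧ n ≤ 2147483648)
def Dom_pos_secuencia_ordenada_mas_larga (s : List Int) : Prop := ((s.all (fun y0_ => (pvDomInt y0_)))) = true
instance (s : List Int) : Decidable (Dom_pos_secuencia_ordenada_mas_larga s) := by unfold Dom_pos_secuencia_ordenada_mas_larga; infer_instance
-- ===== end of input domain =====

-- B replaces A's fused record-tracking scan by two passes: segment into runs, then select the earliest longest run (alternative decomposition, same cost).

-- ===== PORT A =====
-- loop body of A: state (pos_mejor, long_mejor, pos_actual, long_actual)
def stepA (s : List Int) (st : Int × Int × Int × Int) (i : Int) : Int × Int × Int × Int :=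
  match st with
  | (pm, lm, pa, la) =>
    if PySem.List.pyGetD s i 0 ≤ PySem.List.pyGetD s (i + 1) 0 then
      (pm, lm, pa, la + 1)
    else
      if la > lm then (pa, la, i + 1, 1) else (pm, lm, i + 1, 1)

def pos_secuencia_ordenada_mas_larga (s : List Int) : Int :=
  match (PySem.List.pyRange 0 (PySem.List.len s - 1) 1).foldl (stepA s) (0, 1, 0, 1) with
  | (pm, lm, pa, la) => if la > lm then pa else pm

-- ===== PORT B =====
-- phase-1 loop body: state (runs, start)
def stepB (s : List Int) (st : List (Int × Int) × Int) (i : Int) : List (Int × Int) × Int :=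
  match st with
  | (runs, start) =>
    if PySem.List.pyGetD s (i - 1) 0 > PySem.List.pyGetD s i 0 then
      (runs ++ [(start, i - start)], i)
    else (runs, start)

-- phase-2 loop body: state (best_pos, best_len)
def stepSel (b : Int × Int) (r : Int × Int) : Int × Int :=
  if r.2 > b.2 then r else b

def pos_secuencia_ordenada_mas_larga_alt (s : List Int) : Int :=
  let st := (PySem.List.pyRange 1 (PySem.List.len s) 1).foldl (stepB s) ([], 0)
  let runs := if s.isEmpty then st.1 else st.1 ++ [(st.2, PySem.List.len s - st.2)]
  (runs.foldl stepSel (0, 0)).1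

-- ===== CLAIM (what is proved, stated in full; the proofs are below) =====
def Spec_pos_secuencia_ordenada_mas_larga (s : List Int) (out : Int) : Prop := out = pos_secuencia_ordenada_mas_larga_alt s
instance (s : List Int) (out : Int) : Decidable (Spec_pos_secuencia_ordenada_mas_larga s out) := by unfold Spec_pos_secuencia_ordenada_mas_larga; infer_instance

def Claim_equal_pos_secuencia_ordenada_mas_larga : Prop := ∀ (s : List Int), Dom_pos_secuencia_ordenada_mas_larga s → Spec_pos_secuencia_ordenada_mas_larga s (pos_secuencia_ordenada_mas_larga s)

-- ===== LEMMAS AND PROOFS =====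
def fA (s : List Int) (k : Int) : Int × Int × Int × Int :=
  (PySem.List.pyRange 0 k 1).foldl (stepA s) (0, 1, 0, 1)

def fB (s : List Int) (k : Int) : List (Int × Int) × Int :=
  (PySem.List.pyRange 1 k 1).foldl (stepB s) ([], 0)

def sel (runs : List (Int × Int)) : Int × Int := runs.foldl stepSel (0, 0)

theorem fA_succ (s : List Int) (k : Int) (hk : 1 ≤ k) :
    fA s k = stepA s (fA s (k - 1)) (k - 1) := by
  unfold fA
  conv_lhs => rw [show k = (k - 1) + 1 by ring,
    PySem.List.pyRange_one_succ_right (by omega : (0:Int) ≤ k - 1)]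
  rw [List.foldl_append]
  rfl

theorem fB_succ (s : List Int) (k : Int) (hk : 1 ≤ k) :
    fB s (k + 1) = stepB s (fB s k) k := by
  unfold fB
  rw [PySem.List.pyRange_one_succ_right (by omega : (1:Int) ≤ k), List.foldl_append]
  rfl

theorem sel_append (runs : List (Int × Int)) (r : Int × Int) :
    sel (runs ++ [r]) = stepSel (sel runs) r := by
  unfold sel
  rw [List.foldl_append]
  rfl

-- Invariant linking A's state after indices 0..k-2 with B's state after indices 1..k-1
def InvAB (s : List Int) (k : Int) : Prop :=
  (fA s (k - 1)).2.2.1 = (fB s k).2 ∧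
  (fA s (k - 1)).2.2.2 = k - (fB s k).2 ∧
  (((fB s k).1 = [] ∧ (fA s (k - 1)).1 = 0 ∧ (fA s (k - 1)).2.1 = 1 ∧ (fB s k).2 = 0) ∨
    sel (fB s k).1 = ((fA s (k - 1)).1, (fA s (k - 1)).2.1))

theorem inv_succ (s : List Int) (k : Int) (hk : 1 ≤ k) (ih : InvAB s k) :
    InvAB s (k + 1) := by
  obtain ⟨h1, h2, h3⟩ := ih
  unfold InvAB
  rw [show k + 1 - 1 = k by ring, fA_succ s k hk, fB_succ s k hk]
  set A := fA s (k - 1) with hA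
  set B := fB s k with hB
  obtain ⟨pm, lm, pa, la⟩ := A
  obtain ⟨runs, start⟩ := B
  simp only at h1 h2 h3
  simp only [stepA, stepB]
  rw [show k - 1 + 1 = k by ring]
  set u := PySem.List.pyGetD s (k - 1) 0 with hu
  set v := PySem.List.pyGetD s k 0 with hv
  by_cases hc : u ≤ v
  · simp only [if_pos hc, gt_iff_lt, if_neg (not_lt.mpr hc)]
    exact ⟨h1, by omega, h3⟩
  · simp only [if_neg hc, gt_iff_lt, if_pos (lt_of_not_ge hc)]
    by_cases hgt : lm < la
    · simp only [if_pos hgt]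
      refine ⟨by trivial, by omega, Or.inr ?_⟩
      rw [sel_append]
      rcases h3 with ⟨hr, hpm, hlm, hst⟩ | hsel
      · subst hr hst
        simp only [sel, List.foldl_nil, stepSel]
        rw [if_pos (by omega : (0:Int) < k - 0)]
        simp only [Prod.mk.injEq]
        constructor <;> omega
      · rw [hsel]
        simp only [stepSel]
        rw [if_pos (by omega : lm < k - start)]
        simp only [Prod.mk.injEq]
        constructor <;> omega
    · simp only [if_neg hgt]
      refine ⟨by trivial, by omega, Or.inr ?_⟩
      rw [sel_append]
      rcases h3 with ⟨hr, hpm, hlm, hst⟩ | hsel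
      · subst hr hst
        simp only [sel, List.foldl_nil, stepSel]
        rw [if_pos (by omega : (0:Int) < k - 0)]
        simp only [Prod.mk.injEq]
        constructor <;> omega
      · rw [hsel]
        simp only [stepSel]
        rw [if_neg (by omega : ¬ lm < k - start)]

theorem inv_holds (s : List Int) (k : Nat) (hk : 1 ≤ k) : InvAB s (k : Int) := by
  induction k with
  | zero => omega
  | succ k ih =>
    rcases Nat.lt_or_ge k 1 with h0 | h1
    · interval_cases k
      have hA0 : fA s ((1:Int) - 1) = (0, 1, 0, 1) := by
        unfold fA; rw [show (1:Int) - 1 = 0 by ring, PySem.List.pyRange_one_eq_nil le_rfl]; rfl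
      have hB1 : fB s (1:Int) = ([], 0) := by
        unfold fB; rw [PySem.List.pyRange_one_eq_nil le_rfl]; rfl
      unfold InvAB
      rw [show ((1:Nat) : Int) = (1:Int) by norm_num, hA0, hB1]
      exact ⟨rfl, by norm_num, Or.inl ⟨rfl, rfl, rfl, rfl⟩⟩
    · have := inv_succ s (k : Int) (by exact_mod_cast h1) (ih h1)
      have e : ((k + 1 : Nat) : Int) = (k : Int) + 1 := by push_cast; ring
      rw [e]
      exact this

theorem main_eq (s : List Int) :
    pos_secuencia_ordenada_mas_larga s = pos_secuencia_ordenada_mas_larga_alt s := by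
  cases s with
  | nil => decide
  | cons x t =>
    have hn : 1 ≤ (x :: t).length := by simp
    obtain ⟨h1, h2, h3⟩ := inv_holds (x :: t) (x :: t).length hn
    show (match fA (x :: t) (PySem.List.len (x :: t) - 1) with
      | (pm, lm, pa, la) => if la > lm then pa else pm)
      = (sel ((fB (x :: t) (PySem.List.len (x :: t))).1 ++
          [((fB (x :: t) (PySem.List.len (x :: t))).2,
            PySem.List.len (x :: t) - (fB (x :: t) (PySem.List.len (x :: t))).2)])).1
    rw [show PySem.List.len (x :: t) = (((x :: t).length : Nat) : Int) from PySem.List.len_eq _]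
    have hn1 : (1 : Int) ≤ (((x :: t).length : Nat) : Int) := by exact_mod_cast hn
    set n : Int := (((x :: t).length : Nat) : Int) with hn'
    set A := fA (x :: t) (n - 1) with hA
    set B := fB (x :: t) n with hB
    obtain ⟨pm, lm, pa, la⟩ := A
    obtain ⟨runs, start⟩ := B
    simp only at h1 h2 h3
    rw [sel_append]
    rcases h3 with ⟨hr, hpm, hlm, hst⟩ | hsel
    · subst hr hpm hlm hst
      simp only [sel, List.foldl_nil, stepSel]
      rw [if_pos (by omega : (0:Int) < n - 0)]
      simp only [gt_iff_lt]
      split <;> omega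
    · rw [hsel]
      simp only [stepSel, gt_iff_lt]
      by_cases hgt : lm < n - start
      · rw [if_pos hgt, if_pos (by omega : lm < la)]
        simpa using h1
      · rw [if_neg hgt, if_neg (by omega : ¬ lm < la)]

-- ===== VERDICT (by name: the statement is the Claim_ definition above) =====
theorem pos_secuencia_ordenada_mas_larga_spec : Claim_equal_pos_secuencia_ordenada_mas_larga := by
  intro s _
  unfold Spec_pos_secuencia_ordenada_mas_larga
  exact main_eq s
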